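-- pv_equiv track=rewrite | github.com/SungyongAn/portfolio | math_study_room/backend/routes/calculation.py | get_output_range
-- ===== SOURCE A (Python) =====
-- def get_output_range(num_range):
--     output_range = []
--     for i in range(2):
--         if num_range == 1:
--             output_range.append([1, 9])
--         elif num_range == 2:
--             output_range.append([10, 99])
--         elif num_range == 3:
--             output_range.append([100, 999])
--     return output_range
-- ===== SOURCE B (Python) =====
-- def get_output_range(num_range):
--     if num_range not in (1, 2, 3):
--         return []
--     lo = 10 ** (num_range - 1)
--     hi = 10 ** num_range - 1
--     return [[lo, hi], [lo, hi]]
-- ===== Notes on version B (the rewrite author's own statement) =====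
-- stated objective: simpler
-- what changed: Replaces the loop over range(2) with a per-value if/elif lookup table by a single guard on num_range in {1,2,3} and a closed-form power-of-ten computation of the bounds.
import Mathlib
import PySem

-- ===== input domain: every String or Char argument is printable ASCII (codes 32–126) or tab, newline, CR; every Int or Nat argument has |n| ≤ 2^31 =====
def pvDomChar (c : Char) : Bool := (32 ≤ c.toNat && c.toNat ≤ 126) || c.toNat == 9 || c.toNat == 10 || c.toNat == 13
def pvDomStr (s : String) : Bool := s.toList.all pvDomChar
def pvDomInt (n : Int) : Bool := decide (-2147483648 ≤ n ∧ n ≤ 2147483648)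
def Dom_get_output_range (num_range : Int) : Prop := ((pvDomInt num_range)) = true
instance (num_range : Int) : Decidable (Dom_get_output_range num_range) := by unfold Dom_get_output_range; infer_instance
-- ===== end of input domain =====

-- B replaces A's loop-with-lookup-table by a digit-count guard and closed-form 10^k bounds (simpler).

-- ===== PORT A =====
-- loop body: one iteration of A's for-loop (i is unused in Python; the fold carries the accumulator)
def get_output_range (num_range : Int) : List (List Int) :=
  (List.range 2).foldl
    (fun output_range _ =>
      if num_range = 1 then output_range ++ [[1, 9]]
      else if num_range = 2 then output_range ++ [[10, 99]]
      else if num_range = 3 then output_range ++ [[100, 999]]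
      else output_range)
    []

-- ===== PORT B =====
def get_output_range_alt (num_range : Int) : List (List Int) :=
  if num_range = 1 ∨ num_range = 2 ∨ num_range = 3 then
    let lo : Int := (10 : Int) ^ (num_range - 1).toNat
    let hi : Int := (10 : Int) ^ num_range.toNat - 1
    [[lo, hi], [lo, hi]]
  else []

-- ===== PRECONDITION & SPEC =====
def Spec_get_output_range (num_range : Int) (out : List (List Int)) : Prop := out = get_output_range_alt num_range
instance (num_range : Int) (out : List (List Int)) : Decidable (Spec_get_output_range num_range out) := by unfold Spec_get_output_range; infer_instance

-- ===== CLAIM (what is proved, stated in full; the proofs are below) =====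
def Claim_equal_get_output_range : Prop := ∀ (num_range : Int), Dom_get_output_range num_range → Spec_get_output_range num_range (get_output_range num_range)

-- ===== LEMMAS AND PROOFS =====

-- ===== VERDICT (by name: the statement is the Claim_ definition above) =====
theorem get_output_range_spec : Claim_equal_get_output_range := by
  intro n _
  unfold Spec_get_output_range get_output_range get_output_range_alt
  by_cases h1 : n = 1
  · subst h1; decide
  · by_cases h2 : n = 2
    · subst h2; decide
    · by_cases h3 : n = 3
      · subst h3; decide
      · simp [h1, h2, h3, List.range_succ]
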